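-- pv_equiv track=rewrite | github.com/07734willy/small_programs | dot_flipper/flip.py | sub3S
-- ===== SOURCE A (Python) =====
-- def sub3S(substrings, flips, count):
--     for i in range(len(substrings)):
--         while flips and substrings[i][:3] == "SSS":
--             substrings[i] = substrings[i][3:]
--             count += 3
--             flips -= 1
--         while flips and substrings[i][-3:] == "SSS":
--             substrings[i] = substrings[i][:-3]
--             count += 3
--             flips -= 1
--         substrings[i] = substrings[i].strip('.')
--     substrings = [substring for substring in substrings if substring]
--     return substrings, flips, count
-- ===== SOURCE B (Python) =====
-- def sub3S(substrings, flips, count):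
--     result = []
--     for s in substrings:
--         lead = len(s) - len(s.lstrip('S'))
--         k1 = min(flips, lead // 3)
--         if k1:
--             s = s[3 * k1:]
--         flips -= k1
--         count += 3 * k1
--         trail = len(s) - len(s.rstrip('S'))
--         k2 = min(flips, trail // 3)
--         if k2:
--             s = s[:len(s) - 3 * k2]
--         flips -= k2
--         count += 3 * k2
--         s = s.strip('.')
--         if s:
--             result.append(s)
--     return result, flips, count
-- ===== Notes on version B (the rewrite author's own statement) =====
-- stated objective: alternative
-- what changed: Instead of a while-loop slicing off one 'SSS' block per flip (a fresh copy of the string each iteration), B measures each end's run of 'S' once with lstrip/rstrip and removes min(flips, run//3) blocks in one arithmetic step and one slice; it wins on long runs of 'S' with a large flip budget but is not measurably faster on typical inputs.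
-- outside the precondition, e.g. on sub3S(['SSSSSS'], -1, 0): A returns ([], -3, 6), B returns (['SSS'], 0, -3)
import Mathlib
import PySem

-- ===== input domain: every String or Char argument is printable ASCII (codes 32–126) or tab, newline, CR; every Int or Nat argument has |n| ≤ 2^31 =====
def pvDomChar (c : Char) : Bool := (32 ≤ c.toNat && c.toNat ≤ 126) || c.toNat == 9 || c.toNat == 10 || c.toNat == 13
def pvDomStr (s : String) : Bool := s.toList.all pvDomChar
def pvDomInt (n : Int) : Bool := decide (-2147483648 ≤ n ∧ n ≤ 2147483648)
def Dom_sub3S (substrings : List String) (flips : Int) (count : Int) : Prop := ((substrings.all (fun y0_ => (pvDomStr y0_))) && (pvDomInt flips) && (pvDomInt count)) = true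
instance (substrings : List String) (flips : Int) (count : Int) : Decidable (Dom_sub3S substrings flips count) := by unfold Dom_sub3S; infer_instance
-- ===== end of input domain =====

-- B replaces A's per-flip 'SSS'-slicing loops by measuring each end's 'S' run once and removing
-- min(flips, run//3) blocks arithmetically; equivalence is about the RETURN value only
-- (Python A mutates the `substrings` list in place, B does not).

-- ===== PORT A =====
-- while flips and substrings[i][:3] == "SSS": substrings[i] = substrings[i][3:]; count += 3; flips -= 1
def aLead (s : List Char) (flips count : Int) : List Char × Int × Int :=
  if h : flips ≠ 0 ∧ PySem.List.slice s none (some 3) = ['S', 'S', 'S'] then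
    aLead (PySem.List.slice s (some 3) none) (flips - 1) (count + 3)
  else
    (s, flips, count)
termination_by s.length
decreasing_by
  have h3 : (PySem.List.slice s none (some 3)).length = 3 := by rw [h.2]; rfl
  rw [PySem.List.slice_to s (show (0:Int) ≤ 3 by omega)] at h3
  rw [PySem.List.slice_from s (show (0:Int) ≤ 3 by omega)]
  simp at h3 ⊢
  omega

-- while flips and substrings[i][-3:] == "SSS": substrings[i] = substrings[i][:-3]; count += 3; flips -= 1
def aTrail (s : List Char) (flips count : Int) : List Char × Int × Int :=
  if h : flips ≠ 0 ∧ PySem.List.slice s (some (-3)) none = ['S', 'S', 'S'] then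
    aTrail (PySem.List.slice s none (some (-3))) (flips - 1) (count + 3)
  else
    (s, flips, count)
termination_by s.length
decreasing_by
  have h3 : (PySem.List.slice s (some (-3)) none).length = 3 := by rw [h.2]; rfl
  rw [PySem.List.slice_from_neg_ofNat s 3 (by omega)] at h3
  rw [PySem.List.slice_to_neg_ofNat s 3 (by omega)]
  simp at h3 ⊢
  omega

-- for i in range(len(substrings)): … ; substrings[i] = substrings[i].strip('.')
def aLoop : List (List Char) → Int → Int → List (List Char) × Int × Int
  | [], f, c => ([], f, c)
  | s :: rest, f, c =>
    let r1 := aLead s f c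
    let r2 := aTrail r1.1 r1.2.1 r1.2.2
    let t := PySem.Chars.stripChars r2.1 ['.']
    let r := aLoop rest r2.2.1 r2.2.2
    (t :: r.1, r.2.1, r.2.2)

def sub3S (substrings : List String) (flips : Int) (count : Int) : List String × Int × Int :=
  let r := aLoop (substrings.map (fun s => s.toList)) flips count
  ((r.1.filter (fun t => !t.isEmpty)).map (fun t => String.ofList t), r.2.1, r.2.2)

-- ===== PORT B =====
def bLoop : List (List Char) → Int → Int → List (List Char) × Int × Int
  | [], f, c => ([], f, c)
  | s :: rest, f, c =>
    -- lead = len(s) - len(s.lstrip('S')): lstrip('S') ported by hand as dropWhile on the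
    -- leading chars of the strip set {'S'} — exact for a one-character strip set
    let lead := s.length - (s.dropWhile (fun ch => ch == 'S')).length
    let k1 := min f (PySem.Int.floordiv (lead : Int) 3)
    let s1 := if k1 ≠ 0 then PySem.List.slice s (some (3 * k1)) none else s
    let f1 := f - k1
    let c1 := c + 3 * k1
    -- trail = len(s) - len(s.rstrip('S')): rstrip('S') ported by hand as dropWhile on the
    -- reversed list, reversed back — exact for a one-character strip set
    let trail := s1.length - ((s1.reverse.dropWhile (fun ch => ch == 'S')).reverse).length
    let k2 := min f1 (PySem.Int.floordiv (trail : Int) 3)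
    let s2 := if k2 ≠ 0 then PySem.List.slice s1 none (some ((s1.length : Int) - 3 * k2)) else s1
    let f2 := f1 - k2
    let c2 := c1 + 3 * k2
    let t := PySem.Chars.stripChars s2 ['.']
    let r := bLoop rest f2 c2
    (if t.isEmpty then r.1 else t :: r.1, r.2.1, r.2.2)

def sub3S_alt (substrings : List String) (flips : Int) (count : Int) : List String × Int × Int :=
  let r := bLoop (substrings.map (fun s => s.toList)) flips count
  (r.1.map (fun t => String.ofList t), r.2.1, r.2.2)

-- ===== PRECONDITION & SPEC =====
-- Pre_ excludes negative flips — outside the natural domain of a flip budget — on which A's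
-- `while flips` truthiness test makes the budget unlimited (an accident of the implementation).
def Pre_sub3S (substrings : List String) (flips : Int) (count : Int) : Prop := 0 ≤ flips
instance (substrings : List String) (flips : Int) (count : Int) : Decidable (Pre_sub3S substrings flips count) := by unfold Pre_sub3S; infer_instance

def pvWitness_sub3S : List String × Int × Int := (["SSS.ab", "x"], 1, 0)

def Spec_sub3S (substrings : List String) (flips : Int) (count : Int) (out : List String × Int × Int) : Prop := out = sub3S_alt substrings flips count
instance (substrings : List String) (flips : Int) (count : Int) (out : List String × Int × Int) : Decidable (Spec_sub3S substrings flips count out) := by unfold Spec_sub3S; infer_instance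

-- ===== CLAIM (what is proved, stated in full; the proofs are below) =====
def Claim_equal_sub3S : Prop := ∀ (substrings : List String) (flips : Int) (count : Int), Dom_sub3S substrings flips count → Pre_sub3S substrings flips count → Spec_sub3S substrings flips count (sub3S substrings flips count)

-- ===== LEMMAS AND PROOFS =====

-- length of the leading run of 'S'
def pvRun (s : List Char) : Nat := (s.takeWhile (fun c => c == 'S')).length

theorem pvRun_cons (a : Char) (t : List Char) :
    pvRun (a :: t) = if a = 'S' then pvRun t + 1 else 0 := by
  by_cases h : a = 'S' <;> simp [pvRun, h]

theorem pvRun_nil : pvRun [] = 0 := rfl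

theorem take3_iff (s : List Char) : s.take 3 = ['S', 'S', 'S'] ↔ 3 ≤ pvRun s := by
  rcases s with _ | ⟨a, _ | ⟨b, _ | ⟨c, t⟩⟩⟩ <;> simp [pvRun_cons, pvRun_nil] <;>
    split_ifs <;> simp_all

theorem pvRun_le (s : List Char) : pvRun s ≤ s.length :=
  (List.takeWhile_sublist _).length_le

theorem pvRun_drop3 (s : List Char) (h : 3 ≤ pvRun s) : pvRun (s.drop 3) = pvRun s - 3 := by
  rcases s with _ | ⟨a, _ | ⟨b, _ | ⟨c, t⟩⟩⟩ <;> simp [pvRun_cons, pvRun_nil] at h ⊢ <;>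
    split_ifs at h ⊢ <;> omega

theorem aLead_eq (s : List Char) (f c : Int) :
    0 ≤ f → aLead s f c =
      (s.drop (3 * min f.toNat (pvRun s / 3)),
       f - (min f.toNat (pvRun s / 3) : Nat),
       c + 3 * (min f.toNat (pvRun s / 3) : Nat)) := by
  induction s, f, c using aLead.induct with
  | case1 s f c h ih =>
    intro hf
    have h2 := h.2
    have h3n : (3 : Int).toNat = 3 := rfl
    rw [PySem.List.slice_to s (show (0:Int) ≤ 3 by omega), h3n] at h2
    have hR : 3 ≤ pvRun s := (take3_iff s).1 h2
    rw [aLead, dif_pos h, ih (by omega)]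
    rw [PySem.List.slice_from s (show (0:Int) ≤ 3 by omega), h3n]
    rw [pvRun_drop3 s hR, List.drop_drop]
    have hm : 3 + 3 * min (f - 1).toNat ((pvRun s - 3) / 3)
        = 3 * min f.toNat (pvRun s / 3) := by omega
    rw [hm]
    simp only [Prod.mk.injEq]
    exact ⟨trivial, by omega, by omega⟩
  | case2 s f c h =>
    intro hf
    have hm : min f.toNat (pvRun s / 3) = 0 := by
      rcases not_and_or.1 h with h1 | h1
      · simp at h1; omega
      · have : ¬ (3 ≤ pvRun s) := by
          intro h3
          exact h1 (by
            rw [PySem.List.slice_to s (show (0:Int) ≤ 3 by omega),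
              show (3 : Int).toNat = 3 from rfl]
            exact (take3_iff s).2 h3)
        omega
    rw [aLead, dif_neg h, hm]
    simp

theorem aTrail_eq (s : List Char) (f c : Int) :
    0 ≤ f → aTrail s f c =
      ((s.reverse.drop (3 * min f.toNat (pvRun s.reverse / 3))).reverse,
       f - (min f.toNat (pvRun s.reverse / 3) : Nat),
       c + 3 * (min f.toNat (pvRun s.reverse / 3) : Nat)) := by
  induction s, f, c using aTrail.induct with
  | case1 s f c h ih =>
    intro hf
    have h2 := h.2
    rw [PySem.List.slice_from_neg_ofNat s 3 (by omega)] at h2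
    have hlen : 3 ≤ s.length := by
      have := congrArg List.length h2
      simp at this; omega
    have hrev : s.reverse.take 3 = ['S', 'S', 'S'] := by
      have := congrArg List.reverse h2
      rw [List.reverse_drop] at this
      simpa [show s.length - (s.length - 3) = 3 by omega] using this
    have hR : 3 ≤ pvRun s.reverse := (take3_iff _).1 hrev
    have hts : PySem.List.slice s none (some (-3)) = s.take (s.length - 3) :=
      PySem.List.slice_to_neg_ofNat s 3 (by omega)
    have htr : (s.take (s.length - 3)).reverse = s.reverse.drop 3 := by
      rw [List.reverse_take]
      congr 1
      omega
    rw [hts] at ih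
    rw [aTrail, dif_pos h, hts, ih (by omega), htr]
    rw [pvRun_drop3 _ hR, List.drop_drop]
    have hm : 3 + 3 * min (f - 1).toNat ((pvRun s.reverse - 3) / 3)
        = 3 * min f.toNat (pvRun s.reverse / 3) := by omega
    rw [hm]
    simp only [Prod.mk.injEq]
    exact ⟨trivial, by omega, by omega⟩
  | case2 s f c h =>
    intro hf
    have hm : min f.toNat (pvRun s.reverse / 3) = 0 := by
      rcases not_and_or.1 h with h1 | h1
      · simp at h1; omega
      · have : ¬ (3 ≤ pvRun s.reverse) := by
          intro h3
          apply h1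
          rw [PySem.List.slice_from_neg_ofNat s 3 (by omega)]
          have hlen : 3 ≤ s.length := by
            have := pvRun_le s.reverse
            simp at this; omega
          have ht : s.reverse.take 3 = ['S', 'S', 'S'] := (take3_iff _).2 h3
          apply List.reverse_injective
          rw [List.reverse_drop, show s.length - (s.length - 3) = 3 by omega, ht]
          rfl
        omega
    rw [aTrail, dif_neg h, hm]
    simp

theorem lead_eq (s : List Char) :
    s.length - (s.dropWhile (fun ch => ch == 'S')).length = pvRun s := by
  have h := congrArg List.length
    (List.takeWhile_append_dropWhile (p := fun ch => ch == 'S') (l := s))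
  rw [List.length_append] at h
  unfold pvRun
  omega

theorem bLoop_eq (l : List (List Char)) (f c : Int) (hf : 0 ≤ f) :
    bLoop l f c = ((aLoop l f c).1.filter (fun t => !t.isEmpty), (aLoop l f c).2.1, (aLoop l f c).2.2) := by
  induction l generalizing f c with
  | nil => simp [bLoop, aLoop]
  | cons s rest ih =>
    rw [bLoop, aLoop]
    rw [aLead_eq s f c hf]
    have hk1 : min f (PySem.Int.floordiv ((s.length - (s.dropWhile (fun ch => ch == 'S')).length : Nat) : Int) 3)
        = ((min f.toNat (pvRun s / 3) : Nat) : Int) := by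
      rw [lead_eq, PySem.Int.floordiv_eq_ediv_of_pos (by omega)]
      omega
    rw [hk1]
    set m1 : Nat := min f.toNat (pvRun s / 3) with hm1
    have hs1 : (if (m1 : Int) ≠ 0 then PySem.List.slice s (some (3 * (m1 : Int))) none else s)
        = s.drop (3 * m1) := by
      by_cases h0 : (m1 : Int) = 0
      · simp [show m1 = 0 by omega]
      · rw [if_pos h0, PySem.List.slice_from s (by positivity),
          show ((3 * (m1 : Int))).toNat = 3 * m1 by omega]
    rw [hs1]
    set s1 : List Char := s.drop (3 * m1) with hs1d
    set f1 : Int := f - (m1 : Int) with hf1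
    have hf1n : 0 ≤ f1 := by
      rw [hf1]
      omega
    have htrail : s1.length - ((s1.reverse.dropWhile (fun ch => ch == 'S')).reverse).length
        = pvRun s1.reverse := by
      rw [List.length_reverse, ← List.length_reverse (as := s1)]
      exact lead_eq s1.reverse
    have hk2 : min f1 (PySem.Int.floordiv ((s1.length - ((s1.reverse.dropWhile (fun ch => ch == 'S')).reverse).length : Nat) : Int) 3)
        = ((min f1.toNat (pvRun s1.reverse / 3) : Nat) : Int) := by
      rw [htrail, PySem.Int.floordiv_eq_ediv_of_pos (by omega)]
      omega
    rw [hk2]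
    set m2 : Nat := min f1.toNat (pvRun s1.reverse / 3) with hm2
    have hm2le : 3 * m2 ≤ s1.length := by
      have h1 : pvRun s1.reverse ≤ s1.length := by
        have := pvRun_le s1.reverse
        simpa using this
      omega
    have hs2 : (if (m2 : Int) ≠ 0 then
          PySem.List.slice s1 none (some ((s1.length : Int) - 3 * (m2 : Int))) else s1)
        = (s1.reverse.drop (3 * m2)).reverse := by
      by_cases h0 : (m2 : Int) = 0
      · simp [show m2 = 0 by omega]
      · rw [if_pos h0, PySem.List.slice_to s1 (by omega),
          show ((s1.length : Int) - 3 * (m2 : Int)).toNat = s1.length - 3 * m2 by omega]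
        rw [List.reverse_drop, List.reverse_reverse, List.length_reverse]
    rw [hs2]
    rw [aTrail_eq s1 f1 _ hf1n]
    rw [← hm2]
    rw [ih (f1 - (m2 : Int)) (c + 3 * (m1 : Int) + 3 * (m2 : Int)) (by omega)]
    simp only [List.filter_cons]
    cases hE : (PySem.Chars.stripChars (s1.reverse.drop (3 * m2)).reverse ['.']).isEmpty <;> simp

-- ===== VERDICT (by name: the statement is the Claim_ definition above) =====
theorem sub3S_spec : Claim_equal_sub3S := by
  intro substrings flips count _hdom hpre
  unfold Spec_sub3S sub3S sub3S_alt
  rw [bLoop_eq _ _ _ hpre]
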